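-- pv_equiv track=rewrite | github.com/lPROTOTYPEl/DevOps_HW_Python | hw2.py | string_list_creation
-- ===== SOURCE A (Python) =====
-- def string_list_creation(string):
--     c_word = ""
--     f_list = []
--
--     for word in string:
--         if word != " ":
--             c_word += word
--         elif c_word not in f_list:
--             f_list.append(c_word)
--             c_word = ""
--         else:
--             c_word = ""
--
--     return ' '.join(f_list)
-- ===== SOURCE B (Python) =====
-- def string_list_creation(string):
--     tokens = string.split(' ')[:-1]
--     return ' '.join(dict.fromkeys(tokens))
-- ===== Notes on version B (the rewrite author's own statement) =====
-- stated objective: faster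
-- what changed: Replaces A's per-character accumulate/reset state machine with single-space split tokenization dropping the trailing fragment, followed by an ordered dedup via dict.fromkeys and one join.
import Mathlib
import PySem

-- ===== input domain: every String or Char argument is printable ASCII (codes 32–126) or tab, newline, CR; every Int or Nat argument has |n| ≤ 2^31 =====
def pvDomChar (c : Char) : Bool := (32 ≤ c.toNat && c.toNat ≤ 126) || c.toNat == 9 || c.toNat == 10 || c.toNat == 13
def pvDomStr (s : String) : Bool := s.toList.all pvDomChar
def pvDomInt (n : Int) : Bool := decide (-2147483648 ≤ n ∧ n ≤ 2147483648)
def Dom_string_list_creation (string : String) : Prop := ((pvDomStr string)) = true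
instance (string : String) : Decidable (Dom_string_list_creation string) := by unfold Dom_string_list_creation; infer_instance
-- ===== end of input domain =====

-- B replaces A's per-character accumulate/reset state machine by split(' ')[:-1]
-- followed by an ordered dedup (dict.fromkeys) — simpler, same return value.

-- ===== PORT A =====
-- A's for-loop over the characters: state = (c_word, f_list), branches in A's order.
def string_list_creation (string : String) : String :=
  let st := string.toList.foldl
    (fun (s : List Char × List (List Char)) c =>
      if c ≠ ' ' then (s.1 ++ [c], s.2)
      else if ¬ s.2.contains s.1 then ([], s.2 ++ [s.1])
      else ([], s.2))
    ([], [])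
  String.ofList (PySem.Chars.join [' '] st.2)

-- ===== PORT B =====
-- Source B: tokens = string.split(' ')[:-1]; return ' '.join(dict.fromkeys(tokens))
def string_list_creation_alt (string : String) : String :=
  let tokens := PySem.List.slice (PySem.Chars.splitOn string.toList [' ']) none (some (-1))
  String.ofList (PySem.Chars.join [' '] (PySem.List.dedup tokens))

-- ===== PRECONDITION & SPEC =====
def Spec_string_list_creation (string : String) (out : String) : Prop := out = string_list_creation_alt string
instance (string : String) (out : String) : Decidable (Spec_string_list_creation string out) := by unfold Spec_string_list_creation; infer_instance

-- ===== CLAIM (what is proved, stated in full; the proofs are below) =====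
def Claim_equal_string_list_creation : Prop := ∀ (string : String), Dom_string_list_creation string → Spec_string_list_creation string (string_list_creation string)

-- ===== LEMMAS AND PROOFS =====

-- the tokens of `cs` with a pending word `cw`, read left to right (spec for split(' '))
def pvToks : List Char → List Char → List (List Char)
  | [], cw => [cw]
  | c :: rest, cw => if c = ' ' then cw :: pvToks rest [] else pvToks rest (cw ++ [c])

theorem pvToks_ne_nil (cs cw : List Char) : pvToks cs cw ≠ [] := by
  induction cs generalizing cw with
  | nil => simp [pvToks]
  | cons c rest ih => by_cases h : c = ' ' <;> simp [pvToks, h, ih]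

-- splitOn's fuelled worker, on sep = [' '], computes pvToks
theorem pvGo_space (cs : List Char) : ∀ (fuel : Nat) (cur : List Char) (acc : List (List Char)),
    cs.length < fuel →
    PySem.Chars.splitOn.go [' '] fuel cs cur acc = acc.reverse ++ pvToks cs cur.reverse := by
  induction cs with
  | nil =>
    intro fuel cur acc h
    match fuel with
    | f + 1 => simp [PySem.Chars.splitOn.go, pvToks]
  | cons c rest ih =>
    intro fuel cur acc h
    match fuel with
    | f + 1 =>
      by_cases hc : c = ' '
      · subst hc
        have : [' '].isPrefixOf (' ' :: rest) = true := by simp [List.isPrefixOf]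
        simp only [PySem.Chars.splitOn.go, this, if_pos, List.length_cons, List.length_nil,
          List.drop_succ_cons, List.drop_zero]
        rw [ih f [] (cur.reverse :: acc) (by simpa using Nat.lt_of_succ_lt_succ h)]
        simp [pvToks]
      · have : [' '].isPrefixOf (c :: rest) = false := by
          simp [List.isPrefixOf]; exact fun h => absurd h.symm hc
        simp only [PySem.Chars.splitOn.go, this, Bool.false_eq_true, if_false]
        rw [ih f (c :: cur) acc (by simpa using Nat.lt_of_succ_lt_succ h)]
        simp [pvToks, hc]

theorem pvSplitOn_space (cs : List Char) :
    PySem.Chars.splitOn cs [' '] = pvToks cs [] := by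
  unfold PySem.Chars.splitOn
  rw [pvGo_space cs (cs.length + 1) [] [] (Nat.lt_succ_self _)]
  simp

theorem pvSlice_dropLast {α : Type} (xs : List α) :
    PySem.List.slice xs none (some (-1)) = xs.dropLast := by
  simp only [PySem.List.slice, PySem.List.clampIdx]
  cases xs with
  | nil => rfl
  | cons x t =>
    rw [List.dropLast_eq_take]
    norm_num
    split_ifs <;> omega

-- A's loop, started at (cw, fl), commits exactly the dedup-fold of the non-final tokens
theorem pvLoop_eq (cs : List Char) : ∀ (cw : List Char) (fl : List (List Char)),
    (cs.foldl
      (fun (s : List Char × List (List Char)) c =>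
        if c ≠ ' ' then (s.1 ++ [c], s.2)
        else if ¬ s.2.contains s.1 then ([], s.2 ++ [s.1])
        else ([], s.2)) (cw, fl)).2
    = (pvToks cs cw).dropLast.foldl PySem.Set.add fl := by
  induction cs with
  | nil => intro cw fl; simp [pvToks]
  | cons c rest ih =>
    intro cw fl
    by_cases hc : c = ' '
    · subst hc
      rw [List.foldl_cons]
      simp only [ne_eq, not_true_eq_false, if_false]
      have ht : pvToks (' ' :: rest) cw = cw :: pvToks rest [] := by simp [pvToks]
      rw [ht, List.dropLast_cons_of_ne_nil (pvToks_ne_nil rest []), List.foldl_cons]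
      by_cases hm : fl.contains cw
      · simp only [hm, not_true_eq_false, if_false]
        rw [ih]
        congr 1
        have hmem : cw ∈ fl := by simpa using hm
        simp [PySem.Set.add, hmem]
      · simp only [hm]
        rw [ih]
        congr 1
        have hmem : cw ∉ fl := by simpa using hm
        simp [PySem.Set.add, hmem]
    · rw [List.foldl_cons]
      simp only [ne_eq, hc, not_false_eq_true, if_true]
      have ht : pvToks (c :: rest) cw = pvToks rest (cw ++ [c]) := by simp [pvToks, hc]
      rw [ht]
      exact ih (cw ++ [c]) fl

-- ===== VERDICT (by name: the statement is the Claim_ definition above) =====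
theorem string_list_creation_spec : Claim_equal_string_list_creation := by
  intro string _
  unfold Spec_string_list_creation string_list_creation string_list_creation_alt
  simp only [pvSplitOn_space, pvSlice_dropLast, pvLoop_eq,
    PySem.List.dedup_eq_ofList, PySem.Set.ofList_eq_foldl]
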